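-- pv_equiv track=rewrite | github.com/panda-piglet/CSC1005_Homework | AS2/AS2_Q5_but_SIX_lines.py | character_frequency
-- ===== SOURCE A (Python) =====
-- def character_frequency(characters):
--     dic = {}
--     for element in characters:
--         if element not in dic.get(characters.count(element), []):
--             dic[characters.count(element)] = dic.get(characters.count(element), []) + [element]
--     for key_name in dic:
--         dic[key_name] = sorted (dic[key_name])
--     return dict(sorted(dic.items()))
-- ===== SOURCE B (Python) =====
-- def character_frequency(characters):
--     counts = {}
--     for ch in characters:
--         counts[ch] = counts.get(ch, 0) + 1
--     result = {}
--     for ch in sorted(counts):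
--         result.setdefault(counts[ch], []).append(ch)
--     return dict(sorted(result.items()))
-- ===== Notes on version B (the rewrite author's own statement) =====
-- stated objective: faster
-- what changed: Replaces A's per-character repeated s.count scans and membership tests in growing buckets by one counting pass over the string plus one grouping pass over the sorted distinct characters (buckets come out already sorted).
import Mathlib
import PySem

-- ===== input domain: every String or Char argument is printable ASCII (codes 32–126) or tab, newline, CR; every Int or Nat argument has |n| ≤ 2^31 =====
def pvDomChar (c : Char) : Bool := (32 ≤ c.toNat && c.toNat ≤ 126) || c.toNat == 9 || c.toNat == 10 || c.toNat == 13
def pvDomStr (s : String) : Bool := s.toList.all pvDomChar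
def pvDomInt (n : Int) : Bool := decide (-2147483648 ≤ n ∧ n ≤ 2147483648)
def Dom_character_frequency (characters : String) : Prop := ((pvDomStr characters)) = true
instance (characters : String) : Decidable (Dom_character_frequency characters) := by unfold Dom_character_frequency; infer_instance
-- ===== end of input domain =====

-- B replaces A's per-character repeated `characters.count` scans by one counting pass plus one
-- grouping pass over the sorted distinct characters (objective: faster).
-- Python iteration over a string yields 1-character strings; they are modelled as Char and wrapped
-- into String in the returned value (exact on the string domain).

-- ===== PORT A =====
-- Loop body of A's first for-loop. `characters.count(element)` where element is a single
-- character is the occurrence count of that character, ported exactly as List.count.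
def pvAstep (s : List Char) (dic : PySem.Dict Int (List Char)) (element : Char) : PySem.Dict Int (List Char) :=
  if element ∈ dic.getD ((s.count element : Nat) : Int) [] then dic
  else dic.insert ((s.count element : Nat) : Int) (dic.getD ((s.count element : Nat) : Int) [] ++ [element])

-- `sorted(dic.items())` compares (int, list) pairs whose first components are distinct dict keys,
-- so it is exactly sorting by the integer key (the list components are never compared).
def character_frequency (characters : String) : List (Int × List String) :=
  let s := characters.toList
  let dic := s.foldl (pvAstep s) PySem.Dict.empty
  let dic2 : PySem.Dict Int (List Char) :=
    PySem.Dict.mk (dic.items.map (fun kv => (kv.1, PySem.List.sorted kv.2 (fun x => x))))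
  (PySem.List.sorted dic2.items (fun kv => kv.1)).map (fun kv => (kv.1, kv.2.map (fun c => String.ofList [c])))

-- ===== PORT B =====
-- Loop body of B's grouping loop: result.setdefault(counts[ch], []).append(ch)
def pvBstep (counts : PySem.Dict Char Int) (r : PySem.Dict Int (List Char)) (ch : Char) : PySem.Dict Int (List Char) :=
  r.insert (counts.getD ch 0) (r.getD (counts.getD ch 0) [] ++ [ch])

def character_frequency_alt (characters : String) : List (Int × List String) :=
  let s := characters.toList
  let counts : PySem.Dict Char Int := s.foldl (fun d ch => d.insert ch (d.getD ch 0 + 1)) PySem.Dict.empty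
  let result := (PySem.List.sorted counts.keys (fun x => x)).foldl (pvBstep counts) PySem.Dict.empty
  (PySem.List.sorted result.items (fun kv => kv.1)).map (fun kv => (kv.1, kv.2.map (fun c => String.ofList [c])))

-- ===== PRECONDITION & SPEC =====
def Spec_character_frequency (characters : String) (out : List (Int × List String)) : Prop := out = character_frequency_alt characters
instance (characters : String) (out : List (Int × List String)) : Decidable (Spec_character_frequency characters out) := by unfold Spec_character_frequency; infer_instance

-- ===== CLAIM (what is proved, stated in full; the proofs are below) =====
def Claim_equal_character_frequency : Prop := ∀ (characters : String), Dom_character_frequency characters → Spec_character_frequency characters (character_frequency characters)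

-- ===== LEMMAS AND PROOFS =====

-- occurrence count of a character, as Python's int
def pvCnt (s : List Char) (c : Char) : Int := ((s.count c : Nat) : Int)

-- the common "group by occurrence count" step both loops reduce to
def pvGrpStep (s : List Char) (r : PySem.Dict Int (List Char)) (c : Char) : PySem.Dict Int (List Char) :=
  r.insert (pvCnt s c) (r.getD (pvCnt s c) [] ++ [c])

theorem pv_keys_insert {κ ν : Type} [BEq κ] [LawfulBEq κ] (d : PySem.Dict κ ν) (k : κ) (v : ν) :
    (d.insert k v).keys = PySem.Set.add d.keys k := by
  simp only [PySem.Dict.insert, PySem.Dict.keys, PySem.Set.add, PySem.Set.contains, PySem.Dict.contains]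
  have hmem : ((d.items.any fun p => p.1 == k) = true) ↔ k ∈ List.map (fun x => x.1) d.items := by
    simp only [List.any_eq_true, beq_iff_eq, List.mem_map]
  by_cases h : (d.items.any fun p => p.1 == k) = true
  · rw [if_pos h]
    rw [if_pos (by simpa [List.contains_iff_mem] using hmem.mp h)]
    simp only [List.map_map]
    apply List.map_congr_left; intro p hp
    by_cases hpk : (p.1 == k) = true <;> simp_all
  · rw [if_neg h]
    rw [if_neg (by simpa [List.contains_iff_mem] using (hmem.not.mp h))]
    simp

theorem pv_grp_getD (s : List Char) (L : List Char) :
    ∀ (d : PySem.Dict Int (List Char)) (k : Int),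
      (L.foldl (pvGrpStep s) d).getD k [] = d.getD k [] ++ L.filter (fun c => pvCnt s c == k) := by
  induction L with
  | nil => intro d k; simp
  | cons c L ih =>
    intro d k
    simp only [List.foldl_cons, List.filter_cons]
    rw [ih]
    by_cases hk : pvCnt s c = k
    · subst hk
      simp [pvGrpStep, PySem.Dict.getD_insert_self]
    · have hb : (pvCnt s c == k) = false := by simpa using hk
      simp only [hb, Bool.false_eq_true, if_false]
      simp only [pvGrpStep]
      rw [PySem.Dict.getD_insert_of_ne _ _ _ (Ne.symm hk)]

theorem pv_grp_keys (s : List Char) (L : List Char) :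
    ∀ (d : PySem.Dict Int (List Char)),
      (L.foldl (pvGrpStep s) d).keys = (L.map (pvCnt s)).foldl PySem.Set.add d.keys := by
  induction L with
  | nil => intro d; simp
  | cons c L ih =>
    intro d
    simp only [List.foldl_cons, List.map_cons]
    rw [ih, pvGrpStep, pv_keys_insert]

-- A's guarded loop over the whole string is the grouping loop over the distinct characters
theorem pv_afold_eq_grp (s : List Char) :
    ∀ (t M : List Char),
      t.foldl (pvAstep s) (M.foldl (pvGrpStep s) PySem.Dict.empty)
        = (t.foldl PySem.Set.add M).foldl (pvGrpStep s) PySem.Dict.empty := by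
  intro t
  induction t with
  | nil => intro M; rfl
  | cons e t ih =>
    intro M
    simp only [List.foldl_cons]
    have hguard : (e ∈ (M.foldl (pvGrpStep s) PySem.Dict.empty).getD (pvCnt s e) []) ↔ e ∈ M := by
      rw [pv_grp_getD]
      simp [PySem.Dict.empty, PySem.Dict.getD, PySem.Dict.get?, List.mem_filter]
    simp only [pvCnt] at hguard
    by_cases hM : e ∈ M
    · have hstep : pvAstep s (M.foldl (pvGrpStep s) PySem.Dict.empty) e = M.foldl (pvGrpStep s) PySem.Dict.empty := by
        simp only [pvAstep]
        rw [if_pos]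
        exact hguard.mpr hM
      have hadd : PySem.Set.add M e = M := by
        simp [PySem.Set.add, PySem.Set.contains, hM]
      rw [hstep, hadd] at *
      exact ih M
    · have hstep : pvAstep s (M.foldl (pvGrpStep s) PySem.Dict.empty) e
          = (M ++ [e]).foldl (pvGrpStep s) PySem.Dict.empty := by
        simp only [pvAstep]
        rw [if_neg (fun h => hM (hguard.mp h))]
        rw [List.foldl_append]
        rfl
      have hadd : PySem.Set.add M e = M ++ [e] := by
        simp [PySem.Set.add, PySem.Set.contains, hM]
      rw [hstep, hadd]
      exact ih (M ++ [e])

theorem pv_grp_keys_ofList (s L : List Char) :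
    (L.foldl (pvGrpStep s) PySem.Dict.empty).keys = PySem.Set.ofList (L.map (pvCnt s)) := by
  rw [pv_grp_keys, PySem.Set.ofList_eq_foldl]; rfl

theorem pv_grp_keys_nodup (s L : List Char) :
    ((L.foldl (pvGrpStep s) PySem.Dict.empty).keys).Nodup := by
  rw [pv_grp_keys_ofList]
  exact PySem.Set.nodup_ofList _

theorem pv_grp_items (s L : List Char) :
    (L.foldl (pvGrpStep s) PySem.Dict.empty).items
      = ((L.foldl (pvGrpStep s) PySem.Dict.empty).keys).map
          (fun k => (k, L.filter (fun c => pvCnt s c == k))) := by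
  rw [PySem.Dict.items_eq_map_keys _ (pv_grp_keys_nodup s L) []]
  apply List.map_congr_left; intro k hk
  rw [pv_grp_getD]
  simp [PySem.Dict.empty, PySem.Dict.getD, PySem.Dict.get?]

-- the bucket of a count is already sorted after B's pass: sorting commutes with filtering
theorem pv_bucket_sorted (s : List Char) (k : Int) :
    PySem.List.sorted ((PySem.List.dedup s).filter (fun c => pvCnt s c == k)) (fun x => x)
      = (PySem.List.sorted (PySem.List.dedup s) (fun x => x)).filter (fun c => pvCnt s c == k) := by
  apply PySem.List.sorted_eq_of_perm_of_pairwise_lt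
  · exact (PySem.List.sorted_perm _ _ _).filter _
  · exact (PySem.List.sorted_ofList_pairwise_lt s).filter _

theorem pv_main (characters : String) :
    (let s := characters.toList
     let dic := s.foldl (pvAstep s) PySem.Dict.empty
     let dic2 : PySem.Dict Int (List Char) :=
       PySem.Dict.mk (dic.items.map (fun kv => (kv.1, PySem.List.sorted kv.2 (fun x => x))))
     (PySem.List.sorted dic2.items (fun kv => kv.1)).map (fun kv => (kv.1, kv.2.map (fun c => String.ofList [c]))))
    = (let s := characters.toList
       let counts : PySem.Dict Char Int := s.foldl (fun d ch => d.insert ch (d.getD ch 0 + 1)) PySem.Dict.empty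
       let result := (PySem.List.sorted counts.keys (fun x => x)).foldl (pvBstep counts) PySem.Dict.empty
       (PySem.List.sorted result.items (fun kv => kv.1)).map (fun kv => (kv.1, kv.2.map (fun c => String.ofList [c])))) := by
  set s := characters.toList with hs
  set D := PySem.List.dedup s with hD
  set SD := PySem.List.sorted D (fun x => x) with hSD
  -- B's counting loop is Counter(s)
  have hC : s.foldl (fun d ch => d.insert ch (d.getD ch 0 + 1)) PySem.Dict.empty = PySem.Dict.counter s :=
    PySem.Dict.foldl_insert_getD_add_one_eq_counter s
  have hkeysC : (PySem.Dict.counter s).keys = D := by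
    rw [PySem.Dict.keys_counter]; rfl
  have hBstep : pvBstep (PySem.Dict.counter s) = pvGrpStep s := by
    funext r ch
    simp [pvBstep, pvGrpStep, pvCnt, PySem.Dict.getD_counter]
  -- A's guarded loop is the grouping loop over the distinct characters
  have hA : s.foldl (pvAstep s) PySem.Dict.empty = D.foldl (pvGrpStep s) PySem.Dict.empty := by
    have := pv_afold_eq_grp s s []
    simpa [← PySem.Set.ofList_eq_foldl, hD, PySem.List.dedup] using this
  simp only [hC, hkeysC, hBstep, hA, ← hSD]
  -- items of the two grouped dicts
  have hitemsA := pv_grp_items s D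
  have hitemsB := pv_grp_items s SD
  set KA := (D.foldl (pvGrpStep s) PySem.Dict.empty).keys with hKA
  set KB := (SD.foldl (pvGrpStep s) PySem.Dict.empty).keys with hKB
  -- A's value-sorted items list carries the same buckets as B's
  have hAitems2 : ((D.foldl (pvGrpStep s) PySem.Dict.empty).items.map
        (fun kv => (kv.1, PySem.List.sorted kv.2 (fun x => x))))
      = KA.map (fun k => (k, SD.filter (fun c => pvCnt s c == k))) := by
    rw [hitemsA, List.map_map]
    apply List.map_congr_left; intro k hk
    exact congrArg (fun l => (k, l)) (pv_bucket_sorted s k)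
  rw [hAitems2, hitemsB]
  -- the two key lists are permutations of each other
  have hKperm : KA.Perm KB := by
    rw [hKA, hKB, pv_grp_keys_ofList, pv_grp_keys_ofList]
    rw [List.perm_ext_iff_of_nodup (PySem.Set.nodup_ofList _) (PySem.Set.nodup_ofList _)]
    intro k
    rw [PySem.Set.mem_ofList, PySem.Set.mem_ofList]
    exact List.Perm.mem_iff (((PySem.List.sorted_perm D (fun x => x) false).map (pvCnt s)).symm)
  -- both returns sort the same association list by its (distinct) integer keys
  have hsorted : PySem.List.sorted (KA.map (fun k => (k, SD.filter (fun c => pvCnt s c == k)))) (fun kv => kv.1)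
      = PySem.List.sorted (KB.map (fun k => (k, SD.filter (fun c => pvCnt s c == k)))) (fun kv => kv.1) := by
    apply PySem.List.sorted_eq_of_perm_of_pairwise_lt
    · exact (PySem.List.sorted_perm _ _ _).trans ((hKperm.map _).symm)
    · have hle := PySem.List.sorted_pairwise (KB.map (fun k => (k, SD.filter (fun c => pvCnt s c == k)))) (fun kv => kv.1)
      have hfst : (KB.map (fun k => (k, SD.filter (fun c => pvCnt s c == k)))).map (fun kv => kv.1) = KB := by
        simp [Function.comp_def]
      have hndB : ((KB.map (fun k => (k, SD.filter (fun c => pvCnt s c == k)))).map (fun kv => kv.1)).Nodup := by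
        rw [hfst, hKB]; exact pv_grp_keys_nodup s SD
      have hnd : ((PySem.List.sorted (KB.map (fun k => (k, SD.filter (fun c => pvCnt s c == k)))) (fun kv => kv.1)).map (fun kv : Int × List Char => kv.1)).Nodup := by
        exact (((PySem.List.sorted_perm (KB.map (fun k => (k, SD.filter (fun c => pvCnt s c == k)))) (fun kv => kv.1) false).map (fun kv : Int × List Char => kv.1)).nodup_iff).mpr hndB
      have hne := List.pairwise_map.mp hnd
      exact (hle.and hne).imp (fun h => lt_of_le_of_ne h.1 h.2)
  rw [hsorted]

-- ===== VERDICT (by name: the statement is the Claim_ definition above) =====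
theorem character_frequency_spec : Claim_equal_character_frequency := by
  intro characters _
  show character_frequency characters = character_frequency_alt characters
  unfold character_frequency character_frequency_alt
  exact pv_main characters
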